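-- pv_equiv track=rewrite | github.com/Jassica-Li/LeetCode | dp/08all_construct.py | all_construct_with_tabulation
-- ===== SOURCE A (Python) =====
-- def all_construct_with_tabulation(target, word_bank):
--     result_array = [None] * (len(target) + 1)
--     result_array[0] = [[]]
--
--     for i in range(len(result_array)):
--         if result_array[i] is not None:
--             for word in word_bank:
--                 if len(word) + i <= len(target) and target[i:len(word) + i] == word:
--                     if result_array[i + len(word)] is None:
--                         result_array[i + len(word)] = []
--                     for combination in result_array[i]:
--                         result_array[len(word) + i].append([word] + combination)
--     return result_array[len(target)]
-- ===== SOURCE B (Python) =====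
-- def all_construct_with_tabulation(target, word_bank):
--     # Pull-style DP: cell j is built in one comprehension from earlier cells;
--     # no None sentinels and no in-place pushing into later cells.
--     combos = [[[]]]
--     for j in range(1, len(target) + 1):
--         combos.append([[word] + c
--                        for i in range(j)
--                        for word in word_bank
--                        if len(word) == j - i and target[i:j] == word
--                        for c in combos[i]])
--     res = combos[len(target)]
--     return res if res else None
-- ===== Notes on version B (the rewrite author's own statement) =====
-- stated objective: simpler
-- what changed: Replaces A's forward-pushing tabulation over a None-sentinel array (mutating later cells word by word) with a pull-style DP that builds each cell completely in one comprehension from earlier cells, using empty-list instead of None to mark unreachable positions.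
import Mathlib
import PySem

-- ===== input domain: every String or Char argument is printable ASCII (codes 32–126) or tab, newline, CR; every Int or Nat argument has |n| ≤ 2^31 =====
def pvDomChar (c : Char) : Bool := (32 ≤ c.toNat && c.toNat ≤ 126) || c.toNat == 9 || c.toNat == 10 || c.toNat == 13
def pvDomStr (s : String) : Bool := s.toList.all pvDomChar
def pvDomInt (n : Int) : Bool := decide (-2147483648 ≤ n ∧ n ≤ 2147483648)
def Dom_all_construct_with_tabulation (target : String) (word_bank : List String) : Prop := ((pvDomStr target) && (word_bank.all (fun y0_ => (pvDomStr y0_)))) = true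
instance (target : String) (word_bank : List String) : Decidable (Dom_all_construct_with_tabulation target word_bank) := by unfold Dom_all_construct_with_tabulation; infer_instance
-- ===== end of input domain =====

-- B replaces A's forward-pushing None-sentinel tabulation by a pull-style DP that
-- builds each cell in one comprehension from earlier cells (objective: simpler).


-- ===== PORT A =====
-- len(word) + i <= len(target) and target[i:len(word)+i] == word
-- (the slice is exact here: 0 ≤ i and 0 ≤ len(word)+i, so it is take/drop)
abbrev pvCondA (t : List Char) (i : Nat) (w : String) : Prop :=
  w.toList.length + i ≤ t.length ∧ (t.drop i).take w.toList.length = w.toList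

-- for combination in result_array[i]: result_array[len(word)+i].append([word] + combination)
def pvAppendLoop (i : Nat) (w : String) (arr1 : List (Option (List (List String)))) :
    List (Option (List (List String))) :=
  ((arr1.getD i none).getD []).foldl
    (fun a c => a.set (w.toList.length + i)
      (some (((a.getD (w.toList.length + i) none).getD []) ++ [w :: c]))) arr1

-- body of `for word in word_bank:` at index i
def pvInnerA (t : List Char) (i : Nat) (arr : List (Option (List (List String)))) (w : String) :
    List (Option (List (List String))) :=
  if pvCondA t i w then
    -- if result_array[i + len(word)] is None: result_array[i + len(word)] = []
    pvAppendLoop i w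
      (if arr.getD (i + w.toList.length) none = none
       then arr.set (i + w.toList.length) (some []) else arr)
  else arr

-- body of `for i in range(len(result_array)):`
def pvStepA (t : List Char) (bank : List String)
    (arr : List (Option (List (List String)))) (i : Nat) :
    List (Option (List (List String))) :=
  match arr.getD i none with
  | none => arr
  | some _ => bank.foldl (pvInnerA t i) arr

def all_construct_with_tabulation (target : String) (word_bank : List String) :
    Option (List (List String)) :=
  let t := target.toList
  let arr0 := (List.replicate (t.length + 1) (none : Option (List (List String)))).set 0 (some [[]])
  let arr := (List.range (t.length + 1)).foldl (pvStepA t word_bank) arr0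
  arr.getD t.length none

-- ===== PORT B =====
-- [[word]+c for i in range(j) for word in word_bank
--           if len(word)==j-i and target[i:j]==word for c in combos[i]]
def pvCell (t : List Char) (bank : List String)
    (tb : List (List (List String))) (j : Nat) : List (List String) :=
  (List.range j).flatMap (fun i =>
    bank.flatMap (fun w =>
      if w.toList.length = j - i ∧ (t.drop i).take (j - i) = w.toList
      then (tb.getD i []).map (fun c => w :: c) else []))

-- the `combos` list after the loop has run up to j (combos = [[[]]] before the loop)
def pvTableB (t : List Char) (bank : List String) : Nat → List (List (List String))
  | 0 => [[[]]]
  | j + 1 => let tb := pvTableB t bank j; tb ++ [pvCell t bank tb (j + 1)]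

def all_construct_with_tabulation_alt (target : String) (word_bank : List String) :
    Option (List (List String)) :=
  let t := target.toList
  let res := (pvTableB t word_bank t.length).getD t.length []
  if res = [] then none else some res

-- ===== PRECONDITION & SPEC =====
-- Pre_ excludes word banks containing the empty string: there Python A never returns
-- (it appends to result_array[i] while iterating over it, looping forever).
def Pre_all_construct_with_tabulation (target : String) (word_bank : List String) : Prop :=
  "" ∉ word_bank
instance (target : String) (word_bank : List String) :
    Decidable (Pre_all_construct_with_tabulation target word_bank) := by
  unfold Pre_all_construct_with_tabulation; infer_instance

def pvWitness_all_construct_with_tabulation : String × List String :=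
  ("abcdef", ["ab", "abc", "cd", "def", "abcd", "ef", "c"])

def Spec_all_construct_with_tabulation (target : String) (word_bank : List String) (out : Option (List (List String))) : Prop := out = all_construct_with_tabulation_alt target word_bank
instance (target : String) (word_bank : List String) (out : Option (List (List String))) : Decidable (Spec_all_construct_with_tabulation target word_bank out) := by unfold Spec_all_construct_with_tabulation; infer_instance

-- ===== CLAIM (what is proved, stated in full; the proofs are below) =====
def Claim_equal_all_construct_with_tabulation : Prop := ∀ (target : String) (word_bank : List String), Dom_all_construct_with_tabulation target word_bank → Pre_all_construct_with_tabulation target word_bank → Spec_all_construct_with_tabulation target word_bank (all_construct_with_tabulation target word_bank)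

-- ===== LEMMAS AND PROOFS =====

-- B's cell value at position j
def pvF (t : List Char) (bank : List String) (j : Nat) : List (List String) :=
  (pvTableB t bank j).getD j []

-- contribution that A's step i sends to cell j (phrased with A's guard)
def pvContrib (t : List Char) (bank : List String) (j i : Nat) : List (List String) :=
  bank.flatMap (fun w =>
    if i + w.toList.length = j ∧ pvCondA t i w
    then (pvF t bank i).map (fun c => w :: c) else [])

-- cell j after A's steps 0..k-1
def pvC (t : List Char) (bank : List String) (j k : Nat) : List (List String) :=
  (List.range k).flatMap (pvContrib t bank j)

-- array entry j after A's steps 0..k-1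
def pvVal (t : List Char) (bank : List String) (k j : Nat) : Option (List (List String)) :=
  if j = 0 then some [[]]
  else if pvC t bank j (min k j) = [] then none else some (pvC t bank j (min k j))

theorem pv_flatMap_congr {α β : Type} (l : List α) (f g : α → List β)
    (h : ∀ x ∈ l, f x = g x) : l.flatMap f = l.flatMap g := by
  induction l with
  | nil => rfl
  | cons a l ih =>
    simp only [List.flatMap_cons]
    rw [h a (by simp), ih (fun x hx => h x (List.mem_cons_of_mem _ hx))]

theorem pv_getD_set_self {α : Type} (l : List (Option α)) (j : Nat) (v : Option α)
    (h : j < l.length) : (l.set j v).getD j none = v := by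
  simp [List.getD_eq_getElem?_getD, List.getElem?_set_self', h]

theorem pv_getD_set_ne {α : Type} (l : List (Option α)) (i j : Nat) (v : Option α)
    (h : i ≠ j) : (l.set i v).getD j none = l.getD j none := by
  simp [List.getD_eq_getElem?_getD, List.getElem?_set_ne h]

theorem pv_set_getD_self {α : Type} (l : List (Option α)) (j : Nat) (x : α)
    (h : j < l.length) (hx : l.getD j none = some x) : l.set j (some x) = l := by
  have h1 : l[j] = some x := by
    have := List.getElem?_eq_getElem h
    rw [List.getD_eq_getElem?_getD, this] at hx
    simpa using hx
  rw [← h1]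
  exact List.set_getElem_self h

theorem pv_toList_len_pos (w : String) (hw : w ≠ "") : 0 < w.toList.length := by
  cases h : w.toList with
  | nil => exact absurd (by simp [String.toList_eq_nil_iff] at h; exact h) hw
  | cons a l => simp

theorem pvTableB_length (t : List Char) (bank : List String) (m : Nat) :
    (pvTableB t bank m).length = m + 1 := by
  induction m with
  | zero => rfl
  | succ m ih => simp [pvTableB, ih]

theorem pvTableB_getD (t : List Char) (bank : List String) :
    ∀ m i, i ≤ m → (pvTableB t bank m).getD i [] = pvF t bank i := by
  intro m
  induction m with
  | zero => intro i hi; interval_cases i; rfl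
  | succ m ih =>
    intro i hi
    rcases Nat.lt_or_ge i (m + 1) with h | h
    · rw [← ih i (Nat.lt_succ_iff.mp h)]
      simp only [pvTableB, List.getD]
      rw [List.getElem?_append_left (by rw [pvTableB_length]; omega)]
    · have : i = m + 1 := le_antisymm hi h
      subst this; rfl

theorem pvF_zero (t : List Char) (bank : List String) : pvF t bank 0 = [[]] := rfl

-- B's guard at split (i, j) ↔ A's guard for the word pushed from i to j
theorem pvGuard_iff (t : List Char) (i j : Nat) (w : String) (hij : i < j) :
    (w.toList.length = j - i ∧ (t.drop i).take (j - i) = w.toList) ↔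
      (i + w.toList.length = j ∧ pvCondA t i w) := by
  unfold pvCondA
  constructor
  · rintro ⟨h1, h2⟩
    have hl := congrArg List.length h2
    simp only [List.length_take, List.length_drop] at hl
    refine ⟨by omega, by omega, ?_⟩
    rw [h1]; exact h2
  · rintro ⟨h1, hb, h2⟩
    refine ⟨by omega, ?_⟩
    rw [show j - i = w.toList.length by omega]
    exact h2

theorem pvF_succ (t : List Char) (bank : List String) (j : Nat) :
    pvF t bank (j + 1) = pvC t bank (j + 1) (j + 1) := by
  have hstep : pvF t bank (j + 1) = pvCell t bank (pvTableB t bank j) (j + 1) := by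
    unfold pvF
    show (pvTableB t bank j ++ [pvCell t bank (pvTableB t bank j) (j + 1)]).getD (j+1) [] = _
    simp only [List.getD]
    rw [List.getElem?_append_right (by rw [pvTableB_length])]
    simp [pvTableB_length]
  rw [hstep]
  unfold pvCell pvC
  apply pv_flatMap_congr
  intro i hi
  have hij : i < j + 1 := List.mem_range.mp hi
  unfold pvContrib
  apply pv_flatMap_congr
  intro w _
  rw [pvTableB_getD t bank j i (by omega)]
  by_cases hB : (w.toList.length = j + 1 - i ∧ (t.drop i).take (j + 1 - i) = w.toList)
  · rw [if_pos hB, if_pos ((pvGuard_iff t i (j + 1) w hij).mp hB)]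
  · rw [if_neg hB, if_neg (fun hA => hB ((pvGuard_iff t i (j + 1) w hij).mpr hA))]

theorem pvF_eq_C (t : List Char) (bank : List String) (j : Nat) (hj : 1 ≤ j) :
    pvF t bank j = pvC t bank j j := by
  cases j with
  | zero => omega
  | succ j => exact pvF_succ t bank j

theorem pvContrib_of_nil (t : List Char) (bank : List String) (j i : Nat)
    (h : pvF t bank i = []) : pvContrib t bank j i = [] := by
  simp [pvContrib, h]

-- the combination loop = one set of (old ++ mapped list)
theorem pv_combo_fold (w : String) (j : Nat) (L0 : List (List String)) :
    ∀ (x : List (List String)) (arr : List (Option (List (List String)))),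
      j < arr.length → arr.getD j none = some x →
      L0.foldl (fun a c => a.set j (some (((a.getD j none).getD []) ++ [w :: c]))) arr
        = arr.set j (some (x ++ L0.map (fun c => w :: c))) := by
  induction L0 with
  | nil =>
    intro x arr hj hx
    simp only [List.foldl_nil, List.map_nil, List.append_nil]
    exact (pv_set_getD_self arr j x hj hx).symm
  | cons c cs ih =>
    intro x arr hj hx
    simp only [List.foldl_cons, hx, Option.getD_some]
    rw [ih (x ++ [w :: c]) (arr.set j (some (x ++ [w :: c]))) (by simpa using hj)
      (pv_getD_set_self arr j _ hj)]
    rw [List.set_set]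
    simp

theorem pvInnerA_eq (t : List Char) (i : Nat) (w : String)
    (arr : List (Option (List (List String)))) (hlen : arr.length = t.length + 1)
    (hw : w ≠ "") :
    pvInnerA t i arr w =
      if pvCondA t i w then
        arr.set (w.toList.length + i)
          (some (((arr.getD (w.toList.length + i) none).getD []) ++
            (((arr.getD i none).getD []).map (fun c => w :: c))))
      else arr := by
  have hwlen : 0 < w.toList.length := pv_toList_len_pos w hw
  unfold pvInnerA
  by_cases hc : pvCondA t i w
  · rw [if_pos hc, if_pos hc]
    have hjw : w.toList.length + i < arr.length := by
      obtain ⟨hb, -⟩ := hc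
      omega
    have hcomm : i + w.toList.length = w.toList.length + i := Nat.add_comm _ _
    rw [hcomm]
    rcases hmark : arr.getD (w.toList.length + i) none with _ | x
    · -- cell was None: Python marks it with []
      rw [if_pos rfl]
      unfold pvAppendLoop
      rw [pv_getD_set_ne arr (w.toList.length + i) i _ (by omega)]
      rw [pv_combo_fold w (w.toList.length + i) _ []
        (arr.set (w.toList.length + i) (some [])) (by simpa using hjw)
        (pv_getD_set_self arr (w.toList.length + i) _ hjw)]
      rw [List.set_set]
      simp
    · -- cell already a list
      rw [if_neg (by simp)]
      unfold pvAppendLoop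
      rw [pv_combo_fold w (w.toList.length + i) _ x arr hjw hmark]
      simp
  · rw [if_neg hc, if_neg hc]

-- the whole word loop at step i
theorem pv_bank_fold (t : List Char) (i : Nat) (L0 : List (List String)) (hL0 : L0 ≠ []) :
    ∀ (bank : List String) (arr : List (Option (List (List String)))),
      "" ∉ bank → arr.length = t.length + 1 → arr.getD i none = some L0 →
      (bank.foldl (pvInnerA t i) arr).length = arr.length ∧
      ∀ j, (j ≤ i → (bank.foldl (pvInnerA t i) arr).getD j none = arr.getD j none) ∧
        (i < j → j ≤ t.length →
          (bank.foldl (pvInnerA t i) arr).getD j none =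
            (if bank.flatMap (fun w =>
                if i + w.toList.length = j ∧ pvCondA t i w
                then L0.map (fun c => w :: c) else []) = [] then arr.getD j none
             else some (((arr.getD j none).getD []) ++ bank.flatMap (fun w =>
                if i + w.toList.length = j ∧ pvCondA t i w
                then L0.map (fun c => w :: c) else [])))) := by
  intro bank
  induction bank with
  | nil =>
    intro arr _ hlen hx
    refine ⟨rfl, fun j => ⟨fun _ => rfl, fun _ _ => ?_⟩⟩
    rw [List.flatMap_nil, if_pos rfl]
    rfl
  | cons w ws ih =>
    intro arr hb hlen hx
    have hw : w ≠ "" := by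
      intro h; exact hb (by rw [h]; exact List.mem_cons_self)
    have hbs : "" ∉ ws := fun h => hb (List.mem_cons_of_mem _ h)
    have hwlen : 0 < w.toList.length := pv_toList_len_pos w hw
    have hinner := pvInnerA_eq t i w arr hlen hw
    have harr2len : (pvInnerA t i arr w).length = arr.length := by
      rw [hinner]; split <;> simp
    have harr2i : (pvInnerA t i arr w).getD i none = arr.getD i none := by
      rw [hinner]; split
      · exact pv_getD_set_ne arr _ i _ (by omega)
      · rfl
    simp only [List.foldl_cons]
    obtain ⟨ihlen, ihval⟩ := ih (pvInnerA t i arr w) hbs (by rw [harr2len, hlen])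
      (by rw [harr2i]; exact hx)
    refine ⟨by rw [ihlen, harr2len], fun j => ⟨fun hj => ?_, fun hij hjn => ?_⟩⟩
    · -- j ≤ i : untouched
      rw [(ihval j).1 hj, hinner]
      split
      · exact pv_getD_set_ne arr _ j _ (by omega)
      · rfl
    · -- i < j ≤ t.length
      rw [(ihval j).2 hij hjn]
      simp only [List.flatMap_cons]
      by_cases hcw : i + w.toList.length = j ∧ pvCondA t i w
      · -- this word pushes to j
        have hxL0 : (arr.getD i none).getD [] = L0 := by rw [hx]; rfl
        have harr2j : (pvInnerA t i arr w).getD j none =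
            some (((arr.getD j none).getD []) ++ L0.map (fun c => w :: c)) := by
          rw [hinner, if_pos hcw.2, show w.toList.length + i = j by omega,
            pv_getD_set_self arr j _ (by omega), hxL0]
        rw [if_pos hcw, harr2j]
        have hmapne : L0.map (fun c => w :: c) ≠ [] := by
          simpa using hL0
        by_cases hws : ws.flatMap (fun w =>
            if i + w.toList.length = j ∧ pvCondA t i w
            then L0.map (fun c => w :: c) else []) = []
        · rw [if_pos hws, hws, if_neg (by simp [hmapne])]
          simp
        · rw [if_neg hws, if_neg (by simp [hmapne, hws])]
          simp
      · -- this word does not push to j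
        have harr2j : (pvInnerA t i arr w).getD j none = arr.getD j none := by
          rw [hinner]
          split
          · rename_i hcA
            exact pv_getD_set_ne arr _ j _ (fun h => hcw ⟨by omega, hcA⟩)
          · rfl
        rw [if_neg hcw, harr2j]
        simp

def pvInv (t : List Char) (bank : List String) (k : Nat)
    (arr : List (Option (List (List String)))) : Prop :=
  arr.length = t.length + 1 ∧ ∀ j, j ≤ t.length → arr.getD j none = pvVal t bank k j

theorem pvC_succ (t : List Char) (bank : List String) (j k : Nat) :
    pvC t bank j (k + 1) = pvC t bank j k ++ pvContrib t bank j k := by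
  unfold pvC
  rw [List.range_succ, List.flatMap_append]
  simp

theorem pv_step (t : List Char) (bank : List String) (hb : "" ∉ bank) (k : Nat)
    (hk : k ≤ t.length) (arr : List (Option (List (List String))))
    (h : pvInv t bank k arr) : pvInv t bank (k + 1) (pvStepA t bank arr k) := by
  obtain ⟨hlen, hval⟩ := h
  have hvk := hval k hk
  have hcase : (arr.getD k none = some (pvF t bank k) ∧ pvF t bank k ≠ []) ∨
      (1 ≤ k ∧ pvF t bank k = [] ∧ arr.getD k none = none) := by
    rcases Nat.eq_zero_or_pos k with rfl | hpos
    · left; exact ⟨by rw [hvk]; rfl, by rw [pvF_zero]; simp⟩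
    · rw [hvk, pvVal, if_neg (by omega), Nat.min_self, ← pvF_eq_C t bank k hpos]
      by_cases hF : pvF t bank k = []
      · right; exact ⟨hpos, hF, by rw [if_pos hF]⟩
      · left; exact ⟨by rw [if_neg hF], hF⟩
  rcases hcase with ⟨hsome, hL0⟩ | ⟨hpos, hFnil, hnone⟩
  · -- the cell is live: the word loop runs with L0 = pvF k
    unfold pvStepA
    rw [hsome]
    obtain ⟨flen, fval⟩ := pv_bank_fold t k (pvF t bank k) hL0 bank arr hb hlen hsome
    refine ⟨by rw [flen, hlen], fun j hj => ?_⟩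
    by_cases hjk : j ≤ k
    · rw [(fval j).1 hjk, hval j hj]
      unfold pvVal
      rw [Nat.min_eq_right (by omega), Nat.min_eq_right (by omega)]
    · have hj0 : j ≠ 0 := by omega
      rw [(fval j).2 (by omega) hj]
      have hadd : bank.flatMap (fun w =>
          if k + w.toList.length = j ∧ pvCondA t k w
          then (pvF t bank k).map (fun c => w :: c) else []) = pvContrib t bank j k := rfl
      rw [hadd, hval j hj]
      unfold pvVal
      simp only [if_neg hj0, Nat.min_eq_left (show k ≤ j by omega),
        Nat.min_eq_left (show k + 1 ≤ j by omega), pvC_succ]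
      by_cases hc : pvContrib t bank j k = [] <;> by_cases hcj : pvC t bank j k = [] <;>
        simp [hc, hcj]
  · -- the cell is None: the step is skipped and nothing changes
    unfold pvStepA
    rw [hnone]
    refine ⟨hlen, fun j hj => ?_⟩
    rw [hval j hj]
    unfold pvVal
    rcases Nat.eq_zero_or_pos j with rfl | hj0
    · rfl
    simp only [if_neg (show ¬ j = 0 by omega)]
    by_cases hjk : j ≤ k
    · rw [Nat.min_eq_right (show j ≤ k + 1 by omega), Nat.min_eq_right hjk]
    · rw [Nat.min_eq_left (show k ≤ j by omega), Nat.min_eq_left (show k + 1 ≤ j by omega),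
        pvC_succ, pvContrib_of_nil t bank j k hFnil, List.append_nil]

theorem pv_loop (t : List Char) (bank : List String) (hb : "" ∉ bank) :
    ∀ k, k ≤ t.length + 1 →
      pvInv t bank k (((List.range k).foldl (pvStepA t bank)
        ((List.replicate (t.length + 1) (none : Option (List (List String)))).set 0 (some [[]])))) := by
  intro k
  induction k with
  | zero =>
    intro _
    refine ⟨by simp, fun j hj => ?_⟩
    unfold pvVal
    rcases Nat.eq_zero_or_pos j with rfl | hj0
    · simp only [List.range_zero, List.foldl_nil, if_pos rfl]
      exact pv_getD_set_self _ 0 _ (by simp)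
    · simp only [List.range_zero, List.foldl_nil]
      rw [if_neg (by omega)]
      rw [pv_getD_set_ne _ 0 j _ (by omega)]
      rw [show pvC t bank j (min 0 j) = [] by simp [pvC]]
      simp only [if_pos rfl]
      rw [List.getD_eq_getElem?_getD, List.getElem?_replicate]
      split <;> rfl
  | succ k ih =>
    intro hk
    rw [List.range_succ, List.foldl_append, List.foldl_cons, List.foldl_nil]
    exact pv_step t bank hb k (by omega) _ (ih (by omega))

-- ===== VERDICT (by name: the statement is the Claim_ definition above) =====
theorem all_construct_with_tabulation_spec : Claim_equal_all_construct_with_tabulation := by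
  intro target bank _ hpre
  unfold Spec_all_construct_with_tabulation
  unfold all_construct_with_tabulation all_construct_with_tabulation_alt
  simp only []
  have h := pv_loop target.toList bank hpre (target.toList.length + 1) le_rfl
  obtain ⟨hlen, hval⟩ := h
  rw [hval target.toList.length le_rfl]
  rw [pvTableB_getD target.toList bank _ _ le_rfl]
  rcases Nat.eq_zero_or_pos target.toList.length with h0 | hpos
  · rw [h0]; simp [pvVal, pvF_zero]
  · have h1 : (1:Nat) ≤ target.toList.length := hpos
    have hmin : min (target.toList.length + 1) target.toList.length = target.toList.length := by omega
    rw [pvVal, if_neg (by omega), hmin, ← pvF_eq_C target.toList bank _ hpos]
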